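-- pv_equiv track=rewrite | github.com/benslv/aoc | 2017/Day 6/6.py | redistribute
-- ===== SOURCE A (Python) =====
-- def get_max_block(mem: list[int]) -> int:
--     return (max(mem), mem.index(max(mem)))
--
-- def redistribute(mem: list[int]) -> list[int]:
--     val, i = get_max_block(mem)
--
--     mem[i] = 0
--
--     quotient = val // len(mem)
--     remainder = val % len(mem)
--
--     for j in range(len(mem)):
--         mem[j] += quotient
--
--     for j in range(remainder):
--         mem[(i + 1 + j) % len(mem)] += 1
--
--     return mem
-- ===== SOURCE B (Python) =====
-- def redistribute(mem: list[int]) -> list[int]: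
--     # Rotate the banks into distribution order (cell after the max first, the
--     # zeroed max cell last), hand out the blocks in one pass with a decrementing
--     # extras counter, then rotate back.  No modular indexing, no in-place loops.
--     # NOTE: unlike A, this does not mutate mem in place; equivalence is about the
--     # return value.
--     n = len(mem)
--     val = max(mem)
--     i = mem.index(val)
--     ring = mem[i + 1:] + mem[:i] + [0]
--     q, extras = divmod(val, n)
--     out = []
--     for x in ring:
--         out.append(x + q + (1 if extras > 0 else 0))
--         if extras > 0:
--             extras -= 1
--     k = n - 1 - i
--     return out[k:] + out[:k]
-- ===== Notes on version B (the rewrite author's own statement) =====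
-- stated objective: alternative
-- what changed: Instead of A's in-place update with two index loops and modular addressing ((i+1+j)%n), B rotates the list into distribution order (cell after the max first, zeroed max cell last), hands out the blocks in one accumulator pass with a decrementing extras counter, and rotates back with slices; B does not mutate its argument.
import Mathlib
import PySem

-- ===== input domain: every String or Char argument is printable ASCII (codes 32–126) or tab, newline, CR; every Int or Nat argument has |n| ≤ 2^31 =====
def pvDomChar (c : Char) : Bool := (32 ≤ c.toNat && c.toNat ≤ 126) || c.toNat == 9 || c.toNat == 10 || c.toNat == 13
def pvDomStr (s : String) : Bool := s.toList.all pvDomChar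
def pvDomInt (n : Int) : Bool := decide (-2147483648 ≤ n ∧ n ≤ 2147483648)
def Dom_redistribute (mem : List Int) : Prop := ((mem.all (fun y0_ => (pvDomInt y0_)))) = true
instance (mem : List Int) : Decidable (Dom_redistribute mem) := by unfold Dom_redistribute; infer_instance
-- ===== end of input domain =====

-- B replaces A's in-place two-loop modular redistribution by rotate / one counter pass / rotate back
-- (alternative decomposition; A mutates mem in place, B does not — return values proved equal).


-- ===== PORT A =====
def get_max_block (mem : List Int) : Option (Int × Int) :=
  match PySem.List.max? mem (fun y => y) with
  | none => none                     -- max() raises ValueError on []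
  | some v =>
    match PySem.List.index? mem v with
    | none => none
    | some i => some (v, (i : Int))

def redistribute (mem : List Int) : List Int :=
  match get_max_block mem with
  | none => []                       -- unreachable under Pre_ (mem ≠ [])
  | some (val, i) =>
    let mem1 := PySem.List.pySetD mem i 0
    let quotient := PySem.Int.floordiv val (mem1.length : Int)
    let remainder := PySem.Int.mod val (mem1.length : Int)
    let mem2 := (PySem.List.pyRange 0 (mem1.length : Int) 1).foldl
      (fun m j => PySem.List.pySetD m j (PySem.List.pyGetD m j 0 + quotient)) mem1
    let mem3 := (PySem.List.pyRange 0 remainder 1).foldl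
      (fun m j =>
        PySem.List.pySetD m (PySem.Int.mod (i + 1 + j) (m.length : Int))
          (PySem.List.pyGetD m (PySem.Int.mod (i + 1 + j) (m.length : Int)) 0 + 1)) mem2
    mem3

-- ===== PORT B =====
def redistribute_alt (mem : List Int) : List Int :=
  let n : Int := mem.length
  match PySem.List.max? mem (fun y => y) with
  | none => []                       -- max() raises ValueError on []
  | some val =>
    match PySem.List.index? mem val with
    | none => []
    | some i0 =>
      let i : Int := i0
      -- ring = mem[i+1:] + mem[:i] + [0]
      let ring := PySem.List.slice mem (some (i + 1)) none
        ++ PySem.List.slice mem none (some i) ++ [0]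
      match PySem.Int.divmod? val n with
      | none => []
      | some (q, extras0) =>
        -- out = []; for x in ring: out.append(x + q + (1 if extras > 0 else 0)); if extras > 0: extras -= 1
        let st := ring.foldl
          (fun (acc : List Int × Int) x =>
            (acc.1 ++ [x + q + (if acc.2 > 0 then 1 else 0)],
             if acc.2 > 0 then acc.2 - 1 else acc.2)) ([], extras0)
        let out := st.1
        let k : Int := n - 1 - i
        PySem.List.slice out (some k) none ++ PySem.List.slice out none (some k)

-- ===== PRECONDITION & SPEC =====
-- Pre_ excludes only the empty list, on which A (max of an empty sequence) raises ValueError.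
def Pre_redistribute (mem : List Int) : Prop := mem ≠ []
instance (mem : List Int) : Decidable (Pre_redistribute mem) := by unfold Pre_redistribute; infer_instance
def pvWitness_redistribute : List Int := ([0, 2, 7, 0])

def Spec_redistribute (mem : List Int) (out : List Int) : Prop := out = redistribute_alt mem
instance (mem : List Int) (out : List Int) : Decidable (Spec_redistribute mem out) := by unfold Spec_redistribute; infer_instance

-- ===== CLAIM (what is proved, stated in full; the proofs are below) =====
def Claim_equal_redistribute : Prop := ∀ (mem : List Int), Dom_redistribute mem → Pre_redistribute mem → Spec_redistribute mem (redistribute mem)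

-- ===== LEMMAS AND PROOFS =====

-- common elementwise form both ports are reduced to (proof helper only)
def pvFormula (mem : List Int) (i q r : Int) : List Int :=
  (PySem.List.enumerate mem 0).map (fun p =>
    (if p.1 = i then 0 else p.2) + q
      + (if PySem.Int.mod (p.1 - i - 1) (mem.length : Int) < r then 1 else 0))

-- key modular fact: inside one lap, landing cell p ↔ offset (p-i-1) mod n equals the token index t
theorem pv_emod_eq_iff (n a b : Int) (_hn : 0 < n) (hb0 : 0 ≤ b) (hbn : b < n) :
    a % n = b ↔ n ∣ a - b := by
  constructor
  · intro h
    exact ⟨a / n, by rw [← h, Int.emod_def]; ring⟩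
  · rintro ⟨c, hc⟩
    have : a = b + n * c := by linarith
    rw [this, Int.add_mul_emod_self_left]
    exact Int.emod_eq_of_lt hb0 hbn

theorem pv_mod_iff (n i p t : Int) (hn : 0 < n) (hp0 : 0 ≤ p) (hpn : p < n)
    (ht0 : 0 ≤ t) (htn : t < n) :
    p = (i + 1 + t) % n ↔ (p - i - 1) % n = t := by
  rw [pv_emod_eq_iff n (p - i - 1) t hn ht0 htn]
  constructor
  · rintro rfl
    obtain ⟨c, hc⟩ := ((pv_emod_eq_iff n (i + 1 + t) ((i + 1 + t) % n) hn hp0 hpn).mp rfl)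
    exact ⟨-c, by linarith⟩
  · rintro ⟨c, hc⟩
    exact ((pv_emod_eq_iff n (i + 1 + t) p hn hp0 hpn).mpr ⟨-c, by linarith⟩).symm

-- first loop of A: adding `quotient` to every cell is mapping (· + q)
theorem pv_loop1 (q : Int) : ∀ (k a : Nat) (m : List Int), a + k = m.length →
    (PySem.List.pyRange (a : Int) (m.length : Int) 1).foldl
      (fun m j => PySem.List.pySetD m j (PySem.List.pyGetD m j 0 + q)) m
    = m.take a ++ (m.drop a).map (· + q) := by
  intro k
  induction k with
  | zero =>
    intro a m h
    rw [PySem.List.pyRange_one_eq_nil (by omega)]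
    rw [List.take_of_length_le (by omega), List.drop_of_length_le (by omega)]
    simp
  | succ k ih =>
    intro a m h
    have ha : a < m.length := by omega
    rw [PySem.List.pyRange_one_cons (by exact_mod_cast ha)]
    simp only [List.foldl_cons]
    have hget : PySem.List.pyGetD m (a : Int) 0 = m[a] := by
      rw [PySem.List.pyGetD_natCast]; exact List.getD_eq_getElem m 0 ha
    have hset : PySem.List.pySetD m (a : Int) (m[a] + q) = m.set a (m[a] + q) :=
      PySem.List.pySetD_natCast ..
    rw [hget, hset]
    have hlen : (m.set a (m[a] + q)).length = m.length := by simp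
    have hcast : ((a : Int) + 1) = ((a + 1 : Nat) : Int) := by push_cast; ring
    rw [hcast, ← hlen]
    rw [ih (a + 1) (m.set a (m[a] + q)) (by omega)]
    rw [List.set_eq_take_append_cons_drop, if_pos ha]
    rw [List.drop_eq_getElem_cons ha]
    have hta : (m.take a).length = a := by simp [Nat.min_eq_left ha.le]
    have h1 : (m.take a ++ (m[a] + q) :: m.drop (a + 1)).take (a + 1)
        = m.take a ++ [m[a] + q] := by
      rw [List.take_append, List.take_of_length_le (by omega), hta]
      simp
    have h2 : (m.take a ++ (m[a] + q) :: m.drop (a + 1)).drop (a + 1)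
        = m.drop (a + 1) := by
      rw [List.drop_append, List.drop_of_length_le (by omega), hta]
      simp
    rw [h1, h2]
    simp [List.drop_eq_getElem_cons (l := List.map (fun x => x + q) m) (i := a)
      (by simpa using ha)]

-- second loop of A: cell p receives +1 iff its offset after i (mod n) is below t
theorem pv_loop2 (i : Int) (n : Nat) (hn : 0 < n) :
    ∀ (t : Nat), t ≤ n → ∀ (m : List Int), m.length = n →
    (((PySem.List.pyRange 0 (t : Int) 1).foldl
      (fun m j =>
        PySem.List.pySetD m (PySem.Int.mod (i + 1 + j) (m.length : Int))
          (PySem.List.pyGetD m (PySem.Int.mod (i + 1 + j) (m.length : Int)) 0 + 1)) m).length = n)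
    ∧ ∀ p : Nat, p < n →
      ((PySem.List.pyRange 0 (t : Int) 1).foldl
        (fun m j =>
          PySem.List.pySetD m (PySem.Int.mod (i + 1 + j) (m.length : Int))
            (PySem.List.pyGetD m (PySem.Int.mod (i + 1 + j) (m.length : Int)) 0 + 1)) m).getD p 0
      = m.getD p 0 + (if PySem.Int.mod ((p : Int) - i - 1) (n : Int) < (t : Int) then 1 else 0) := by
  have hnI : (0 : Int) < (n : Int) := by exact_mod_cast hn
  intro t
  induction t with
  | zero =>
    intro _ m hm
    rw [PySem.List.pyRange_one_eq_nil (by omega)]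
    refine ⟨hm, fun p hp => ?_⟩
    have := PySem.Int.mod_nonneg ((p : Int) - i - 1) hnI
    rw [if_neg (by omega)]
    simp
  | succ t ih =>
    intro ht m hm
    obtain ⟨ihlen, ihget⟩ := ih (by omega) m hm
    have hcast : ((t + 1 : Nat) : Int) = (t : Int) + 1 := by push_cast; ring
    rw [hcast, PySem.List.pyRange_one_succ_right (by positivity)]
    rw [List.foldl_append, List.foldl_cons, List.foldl_nil]
    set M := (PySem.List.pyRange 0 (t : Int) 1).foldl
      (fun m j =>
        PySem.List.pySetD m (PySem.Int.mod (i + 1 + j) (m.length : Int))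
          (PySem.List.pyGetD m (PySem.Int.mod (i + 1 + j) (m.length : Int)) 0 + 1)) m with hM
    set g : Int := PySem.Int.mod (i + 1 + (t : Int)) ((M.length : Nat) : Int) with hg
    have hg' : g = (i + 1 + (t : Int)) % (n : Int) := by
      rw [hg, ihlen, PySem.Int.mod_eq_emod_of_pos hnI]
    have hg0 : 0 ≤ g := by rw [hg']; exact Int.emod_nonneg _ (by omega)
    have hgn : g < (n : Int) := by rw [hg']; exact Int.emod_lt_of_pos _ hnI
    have hgN : g.toNat < n := by omega
    have hsetd : PySem.List.pySetD M g (PySem.List.pyGetD M g 0 + 1)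
        = M.set g.toNat (PySem.List.pyGetD M g 0 + 1) :=
      PySem.List.pySetD_of_nonneg M _ hg0
    have hgetd : PySem.List.pyGetD M g 0 = M.getD g.toNat 0 := by
      rw [PySem.List.pyGetD_eq_getElem M 0 hg0 (by rw [ihlen]; exact_mod_cast hgn)]
      exact (List.getD_eq_getElem M 0 (by omega)).symm
    -- the cell hit at step t had not been hit before: its offset equals t, and t < t is false
    have hoff : PySem.Int.mod ((g.toNat : Int) - i - 1) (n : Int) = (t : Int) := by
      rw [PySem.Int.mod_eq_emod_of_pos hnI]
      have : (g.toNat : Int) = g := by omega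
      rw [this]
      exact (pv_mod_iff (n : Int) i g (t : Int) hnI hg0 hgn (by positivity)
        (by exact_mod_cast ht)).mp hg'
    have hvalM : M.getD g.toNat 0 = m.getD g.toNat 0 := by
      rw [ihget g.toNat hgN, hoff, if_neg (by omega)]; ring
    rw [hsetd, hgetd, hvalM]
    constructor
    · simp [ihlen]
    · intro p hp
      have hlen2 : (M.set g.toNat (m.getD g.toNat 0 + 1)).length = n := by simp [ihlen]
      rw [List.getD_eq_getElem _ 0 (by omega), List.getElem_set]
      by_cases hpg : g.toNat = p
      · subst hpg
        rw [if_pos rfl, hoff]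
        rw [if_pos (by omega)]
      · rw [if_neg hpg]
        have : M[p]'(by omega) = M.getD p 0 := (List.getD_eq_getElem M 0 (by omega : p < M.length)).symm
        rw [this, ihget p hp]
        have he0 := PySem.Int.mod_nonneg ((p : Int) - i - 1) hnI
        have hen := PySem.Int.mod_lt ((p : Int) - i - 1) hnI
        have hne : PySem.Int.mod ((p : Int) - i - 1) (n : Int) ≠ (t : Int) := by
          intro he
          apply hpg
          have hpcast : (p : Int) = (i + 1 + (t : Int)) % (n : Int) := by
            refine (pv_mod_iff (n : Int) i (p : Int) (t : Int) hnI (by positivity)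
              (by exact_mod_cast hp) (by positivity) (by exact_mod_cast ht)).mpr ?_
            rw [← PySem.Int.mod_eq_emod_of_pos hnI]
            exact he
          omega
        by_cases hlt : PySem.Int.mod ((p : Int) - i - 1) (n : Int) < (t : Int)
        · rw [if_pos hlt, if_pos (by omega)]
        · rw [if_neg hlt, if_neg (by omega)]

-- A's result equals the elementwise formula
theorem pv_A_formula (mem : List Int) (val : Int) (iN : Nat)
    (hmax : PySem.List.max? mem (fun y => y) = some val)
    (hidx : PySem.List.index? mem val = some (iN : Nat)) :
    redistribute mem
      = pvFormula mem (iN : Int) (PySem.Int.floordiv val (mem.length : Int))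
          (PySem.Int.mod val (mem.length : Int)) := by
  obtain ⟨pre, suf, hsplit, hlenpre, -⟩ := (PySem.List.index?_eq_some_iff ..).mp hidx
  have hiN : iN < mem.length := by subst hsplit; simp [← hlenpre]
  have hn : 0 < mem.length := by omega
  set n : Nat := mem.length with hnd
  have hnI : (0 : Int) < (n : Int) := by exact_mod_cast hn
  set q : Int := PySem.Int.floordiv val (n : Int) with hq
  set r : Int := PySem.Int.mod val (n : Int) with hr
  have hr0 : 0 ≤ r := PySem.Int.mod_nonneg val hnI
  have hrn : r < (n : Int) := PySem.Int.mod_lt val hnI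
  have hrt : ((r.toNat : Nat) : Int) = r := by omega
  have hset1 : PySem.List.pySetD mem ((iN : Nat) : Int) 0 = mem.set iN 0 :=
    PySem.List.pySetD_natCast ..
  have hlen1 : (mem.set iN 0).length = n := by rw [List.length_set]
  have hL1 := pv_loop1 q (mem.set iN 0).length 0 (mem.set iN 0) (by omega)
  simp only [Nat.cast_zero, List.take_zero, List.drop_zero, List.nil_append] at hL1
  have hL2 := pv_loop2 (iN : Int) n hn r.toNat (by omega)
    ((mem.set iN 0).map (· + q)) (by simp [hnd])
  rw [hrt] at hL2
  obtain ⟨hlen3, hget3⟩ := hL2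
  simp only [redistribute, get_max_block, hmax, hidx, pvFormula]
  rw [hlen1] at hL1
  rw [hset1, hlen1, hL1, ← hnd]
  apply List.ext_getElem
  · rw [hlen3]
    simp [PySem.List.length_enumerate]
    omega
  · intro p hp1 hp2
    have hpn : p < n := by rw [← hlen3]; exact hp1
    have hA := hget3 p hpn
    rw [List.getElem_eq_getD (fallback := 0)]
    rw [hA]
    have hmid : ((mem.set iN 0).map (· + q)).getD p 0
        = (if p = iN then 0 else mem[p]'(by omega)) + q := by
      rw [List.getD_eq_getElem _ 0 (by simp; omega)]
      rw [List.getElem_map, List.getElem_set]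
      by_cases hpe : iN = p
      · subst hpe; simp
      · rw [if_neg hpe, if_neg (fun h => hpe h.symm)]
    rw [hmid]
    simp only [List.getElem_map, PySem.List.getElem_enumerate, zero_add]
    by_cases hpe : p = iN
    · subst hpe
      rw [if_pos rfl, if_pos rfl]
    · simp [hpe]

-- B's counter loop = mapIdx with an index-below-counter condition
theorem pv_fold (q : Int) : ∀ (l : List Int) (a : List Int) (c : Int),
    (l.foldl (fun (acc : List Int × Int) x =>
       (acc.1 ++ [x + q + (if acc.2 > 0 then 1 else 0)],
        if acc.2 > 0 then acc.2 - 1 else acc.2)) (a, c)).1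
    = a ++ l.mapIdx (fun t x => x + q + (if (t : Int) < c then 1 else 0)) := by
  intro l
  induction l with
  | nil => intro a c; simp
  | cons y l ih =>
    intro a c
    simp only [List.foldl_cons, List.mapIdx_cons, ih]
    have h1 : (fun (t : Nat) (x : Int) =>
        x + q + (if (t : Int) < (if c > 0 then c - 1 else c) then 1 else 0))
        = (fun (t : Nat) (x : Int) =>
        x + q + (if ((t + 1 : Nat) : Int) < c then 1 else 0)) := by
      funext t x
      have hc : ((t + 1 : Nat) : Int) = (t : Int) + 1 := by omega
      rw [hc]
      have ht : (0 : Int) ≤ (t : Int) := by positivity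
      split_ifs <;> omega
    rw [h1]
    simp only [List.append_assoc, List.singleton_append]
    norm_num

-- B's result equals the elementwise formula
theorem pv_B_formula (mem : List Int) (val : Int) (iN : Nat)
    (hmax : PySem.List.max? mem (fun y => y) = some val)
    (hidx : PySem.List.index? mem val = some (iN : Nat)) :
    redistribute_alt mem
      = pvFormula mem (iN : Int) (PySem.Int.floordiv val (mem.length : Int))
          (PySem.Int.mod val (mem.length : Int)) := by
  obtain ⟨pre, suf, hsplit, hlenpre, -⟩ := (PySem.List.index?_eq_some_iff ..).mp hidx
  have hiN : iN < mem.length := by subst hsplit; simp [← hlenpre]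
  have hn : 0 < mem.length := by omega
  set n : Nat := mem.length with hnd
  have hnI : (0 : Int) < (n : Int) := by exact_mod_cast hn
  set q : Int := PySem.Int.floordiv val (n : Int) with hq
  set r : Int := PySem.Int.mod val (n : Int) with hr
  have hr0 : 0 ≤ r := PySem.Int.mod_nonneg val hnI
  have hrn : r < (n : Int) := PySem.Int.mod_lt val hnI
  have hdm : PySem.Int.divmod? val (n : Int) = some (q, r) := by
    rw [hq, hr]
    simp [PySem.Int.divmod?, PySem.Int.floordiv, PySem.Int.mod]
    omega
  simp only [redistribute_alt, hmax, hidx, ← hnd, hdm]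
  -- the slices
  have hc1 : ((iN : Int) + 1) = ((iN + 1 : Nat) : Int) := by push_cast; ring
  rw [hc1, PySem.List.slice_from_natCast, PySem.List.slice_to_natCast]
  set ring : List Int := mem.drop (iN + 1) ++ mem.take iN ++ [0] with hring
  have hlenring : ring.length = n := by
    simp [hring, hnd]
    omega
  rw [pv_fold]
  rw [List.nil_append]
  set out : List Int := ring.mapIdx (fun t x => x + q + (if (t : Int) < r then 1 else 0))
    with hout
  have hlenout : out.length = n := by simp [hout, hlenring]
  set kN : Nat := n - 1 - iN with hkN
  have hc2 : ((n : Int) - 1 - (iN : Int)) = ((kN : Nat) : Int) := by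
    rw [hkN]; omega
  rw [hc2, PySem.List.slice_from_natCast, PySem.List.slice_to_natCast]
  -- elementwise
  apply List.ext_getElem
  · simp [hlenout, PySem.List.length_enumerate, pvFormula]
    omega
  · intro p hp1 hp2
    have hpn : p < n := by
      have := hp1
      simp [hlenout] at this
      omega
    -- RHS element
    simp only [pvFormula, List.getElem_map, PySem.List.getElem_enumerate, zero_add]
    -- LHS element: split the drop/take concatenation
    have hkn : kN ≤ n := by omega
    have houtget : ∀ t (ht : t < n), out[t]'(by omega)
        = (ring[t]'(by omega)) + q + (if (t : Int) < r then 1 else 0) := by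
      intro t ht
      simp [hout]
    by_cases hcase : p ≤ iN
    · -- drop part: index kN + p in out
      have hplt : p < (out.drop kN).length := by
        simp [hlenout]
        omega
      rw [List.getElem_append_left hplt]
      rw [List.getElem_drop]
      rw [houtget (kN + p) (by omega)]
      -- ring[kN + p]
      have hlab : (mem.drop (iN + 1) ++ mem.take iN).length = n - 1 := by
        simp; omega
      have hrg : ring[kN + p]'(by omega) = (if p = iN then 0 else mem[p]'(by omega)) := by
        by_cases hpi : p = iN
        · simp only [hring]
          rw [List.getElem_append_right (by rw [hlab]; omega)]
          rw [if_pos hpi]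
          simp
        · have hpiN : p < iN := by omega
          simp only [hring]
          rw [List.getElem_append_left (by rw [hlab]; omega)]
          rw [List.getElem_append_right (by simp; omega)]
          rw [if_neg hpi]
          simp only [List.getElem_take]
          congr 1
          simp
          omega
      rw [hrg]
      -- the window condition: (p - iN - 1) mod n = kN + p
      have hmodv : PySem.Int.mod ((p : Int) - (iN : Int) - 1) (n : Int) = ((kN + p : Nat) : Int) := by
        rw [PySem.Int.mod_eq_emod_of_pos hnI]
        have h1 : ((kN + p : Nat) : Int) = ((p : Int) - (iN : Int) - 1) + (n : Int) := by
          omega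
        rw [h1]
        exact (pv_emod_eq_iff (n : Int) ((p : Int) - (iN : Int) - 1)
          (((p : Int) - (iN : Int) - 1) + (n : Int)) hnI (by omega) (by omega)).mpr
          ⟨-1, by ring⟩
      rw [hmodv]
      by_cases hpe : p = iN <;> simp [hpe]
    · -- take part: index p - (iN + 1) in out
      have hplen : (out.drop kN).length = iN + 1 := by simp [hlenout]; omega
      rw [List.getElem_append_right (by omega)]
      rw [List.getElem_take]
      simp only [hplen]
      rw [houtget (p - (iN + 1)) (by omega)]
      have hrg : ring[p - (iN + 1)]'(by omega) = mem[p]'(by omega) := by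
        simp only [hring]
        rw [List.getElem_append_left (by simp; omega)]
        rw [List.getElem_append_left (by simp; omega)]
        simp only [List.getElem_drop]
        congr 1
        omega
      rw [hrg]
      rw [if_neg (show ¬((p : Int) = (iN : Int)) by omega)]
      have hmodv : PySem.Int.mod ((p : Int) - (iN : Int) - 1) (n : Int)
          = ((p - (iN + 1) : Nat) : Int) := by
        rw [PySem.Int.mod_eq_emod_of_pos hnI]
        have h1 : ((p - (iN + 1) : Nat) : Int) = (p : Int) - (iN : Int) - 1 := by
          omega
        rw [h1]
        exact Int.emod_eq_of_lt (by omega) (by omega)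
      rw [hmodv]

-- ===== VERDICT (by name: the statement is the Claim_ definition above) =====
theorem redistribute_spec : Claim_equal_redistribute := by
  unfold Claim_equal_redistribute
  intro mem _hdom hpre
  unfold Spec_redistribute
  obtain ⟨val, hmax⟩ : ∃ v, PySem.List.max? mem (fun y => y) = some v := by
    cases mem with
    | nil => exact absurd rfl hpre
    | cons x t => exact ⟨t.foldl max x, PySem.List.max?_id_cons ..⟩
  have hvmem : val ∈ mem := PySem.List.max?_mem hmax
  obtain ⟨iN, hidx⟩ : ∃ k, PySem.List.index? mem val = some k := by
    have := (PySem.List.index?_isSome_iff mem val).mpr hvmem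
    exact Option.isSome_iff_exists.mp this
  rw [pv_A_formula mem val iN hmax hidx, pv_B_formula mem val iN hmax hidx]
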